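-- pv_equiv track=rewrite | github.com/swisskanton/javascript | mainDiagonalProduct.py | main_diagonal_product
-- ===== SOURCE A (Python) =====
-- def main_diagonal_product(mat):
--     i = 0
--     result = 1
--     for item in mat:
--         if i < len(item):
--             result *= item[i]
--         else:
--             break
--         i += 1
--     return result
-- ===== SOURCE B (Python) =====
-- def main_diagonal_product(mat):
--     # Recursive peel: the diagonal product of mat is mat[0][0] times the
--     # diagonal product of the submatrix with the first row and first
--     # column removed; stop at an empty matrix or an empty leading row.
--     if not mat or not mat[0]:
--         return 1
--     return mat[0][0] * main_diagonal_product([row[1:] for row in mat[1:]])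
-- ===== Notes on version B (the rewrite author's own statement) =====
-- stated objective: alternative
-- what changed: Replaces the index-tracking loop with break by structural recursion that peels the first row and first column (mat[0][0] * f([row[1:] for row in mat[1:]])), so no index is maintained at all; it trades this for O(n*m) slicing copies.
import Mathlib
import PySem

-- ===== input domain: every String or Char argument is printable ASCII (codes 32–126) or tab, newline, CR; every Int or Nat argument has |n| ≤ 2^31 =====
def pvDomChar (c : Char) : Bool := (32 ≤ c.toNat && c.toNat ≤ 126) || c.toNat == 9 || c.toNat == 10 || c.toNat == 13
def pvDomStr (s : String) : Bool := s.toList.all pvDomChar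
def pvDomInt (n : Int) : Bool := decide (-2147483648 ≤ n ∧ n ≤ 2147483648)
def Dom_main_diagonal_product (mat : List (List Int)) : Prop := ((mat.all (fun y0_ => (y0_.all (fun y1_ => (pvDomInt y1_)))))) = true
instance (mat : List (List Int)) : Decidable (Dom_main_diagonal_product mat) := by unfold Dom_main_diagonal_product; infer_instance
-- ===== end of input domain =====

-- B replaces the index-tracking loop by structural recursion peeling the first row and column (alternative decomposition, not faster).
-- ===== PORT A =====
-- A's loop: i starts at 0 and only increments, so it is a Nat; item[i] with i < len(item) is getD.
def mdpLoop : List (List Int) → Nat → Int → Int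
  | [], _, result => result
  | item :: rest, i, result =>
    if i < item.length then mdpLoop rest (i + 1) (result * item.getD i 0)
    else result

def main_diagonal_product (mat : List (List Int)) : Int := mdpLoop mat 0 1

-- ===== PORT B =====
-- row[1:] on a Python list = PySem.List.slice row (some 1) none = row.tail (lemma slice_from_one).
def main_diagonal_product_alt : List (List Int) → Int
  | [] => 1
  | row :: rest =>
    match row with
    | [] => 1
    | x :: _ => x * main_diagonal_product_alt (rest.map (fun r => PySem.List.slice r (some 1) none))
termination_by mat => mat.length
decreasing_by simp

-- ===== PRECONDITION & SPEC =====
def Spec_main_diagonal_product (mat : List (List Int)) (out : Int) : Prop := out = main_diagonal_product_alt mat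
instance (mat : List (List Int)) (out : Int) : Decidable (Spec_main_diagonal_product mat out) := by unfold Spec_main_diagonal_product; infer_instance

-- ===== CLAIM (what is proved, stated in full; the proofs are below) =====
def Claim_equal_main_diagonal_product : Prop := ∀ (mat : List (List Int)), Dom_main_diagonal_product mat → Spec_main_diagonal_product mat (main_diagonal_product mat)

-- ===== LEMMAS AND PROOFS =====
-- After i steps of A's loop on the remaining rows `rows`, B's recursion state is `rows.map (List.drop i)`.
theorem mdpLoop_eq (rows : List (List Int)) : ∀ (i : Nat) (r : Int),
    mdpLoop rows i r = r * main_diagonal_product_alt (rows.map (fun row => row.drop i)) := by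
  induction rows with
  | nil => intro i r; simp [mdpLoop, main_diagonal_product_alt]
  | cons item rest ih =>
    intro i r
    by_cases h : i < item.length
    · have hdrop : item.drop i = item[i] :: item.drop (i + 1) := List.drop_eq_getElem_cons h
      simp only [mdpLoop, if_pos h, List.map_cons, hdrop, main_diagonal_product_alt,
        PySem.List.slice_from_one]
      rw [ih (i + 1) (r * item.getD i 0)]
      have htail : ∀ r' : List Int, (r'.drop i).tail = r'.drop (i + 1) := by
        intro r'; rw [← List.drop_drop]; simp
      simp only [List.map_map]
      have hmap : List.map ((fun r : List Int => r.tail) ∘ fun row => List.drop i row) rest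
          = List.map (fun row => List.drop (i + 1) row) rest :=
        List.map_congr_left (fun a _ => htail a)
      rw [hmap]
      rw [List.getD_eq_getElem _ _ h]
      ring
    · have hdrop : item.drop i = [] := List.drop_eq_nil_of_le (by omega)
      simp [mdpLoop, if_neg h, hdrop, main_diagonal_product_alt]

-- ===== VERDICT (by name: the statement is the Claim_ definition above) =====
theorem main_diagonal_product_spec : Claim_equal_main_diagonal_product := by
  intro mat _
  unfold Spec_main_diagonal_product main_diagonal_product
  simpa using mdpLoop_eq mat 0 1
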